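-- pv_equiv track=rewrite | github.com/InfoBloom98/digitaltwin | src/security/resilience_enhancer.py | _calculate_expected_improvements
-- ===== SOURCE A (Python) =====
-- from typing import Dict, List, Any
--
-- def _calculate_expected_improvements(recommendations: List[Dict[str, Any]]) -> Dict[str, Any]:
--     """Calculate expected improvements from recommendations"""
--     improvements = {
--         'security_score_increase': 0,
--         'vulnerability_reduction': 0,
--         'compliance_improvement': 0,
--         'risk_reduction': 0
--     }
--
--     for rec in recommendations:
--         if rec['impact'] == 'high':
--             improvements['security_score_increase'] += 10
--             improvements['vulnerability_reduction'] += 2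
--         elif rec['impact'] == 'medium':
--             improvements['security_score_increase'] += 5
--             improvements['vulnerability_reduction'] += 1
--
--     # Cap improvements
--     improvements['security_score_increase'] = min(improvements['security_score_increase'], 50)
--     improvements['vulnerability_reduction'] = min(improvements['vulnerability_reduction'], 20)
--
--     return improvements
-- ===== SOURCE B (Python) =====
-- def _calculate_expected_improvements(recommendations):
--     """Calculate expected improvements from recommendations"""
--     impacts = [rec['impact'] for rec in recommendations]
--     high = impacts.count('high')
--     medium = impacts.count('medium')
--     return {
--         'security_score_increase': min(10 * high + 5 * medium, 50),
--         'vulnerability_reduction': min(2 * high + medium, 20),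
--         'compliance_improvement': 0,
--         'risk_reduction': 0,
--     }
-- ===== Notes on version B (the rewrite author's own statement) =====
-- stated objective: simpler
-- what changed: B replaces the per-element dict accumulation and post-hoc capping with one map extracting impacts, two counts, and a closed-form capped formula per field.
import Mathlib
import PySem

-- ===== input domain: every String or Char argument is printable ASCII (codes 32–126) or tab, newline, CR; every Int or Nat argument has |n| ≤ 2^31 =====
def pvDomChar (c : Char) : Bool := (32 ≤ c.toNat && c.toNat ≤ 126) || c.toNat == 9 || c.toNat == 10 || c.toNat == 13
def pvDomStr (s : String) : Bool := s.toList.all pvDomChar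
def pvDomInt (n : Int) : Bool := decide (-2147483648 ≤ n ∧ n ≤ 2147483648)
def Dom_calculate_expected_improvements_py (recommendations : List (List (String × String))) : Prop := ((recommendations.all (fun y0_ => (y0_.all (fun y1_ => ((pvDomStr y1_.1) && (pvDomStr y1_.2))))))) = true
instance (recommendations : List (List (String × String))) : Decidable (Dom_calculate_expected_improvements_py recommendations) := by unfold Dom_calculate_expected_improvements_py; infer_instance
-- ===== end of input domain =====

-- B replaces A's per-element dict accumulation + post-hoc capping by two counts and a
-- closed-form capped formula per field (objective: simpler; same asymptotic cost).

-- ===== PORT A =====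
-- rec['impact'] : first-match lookup on the association list; Pre_ guarantees the key exists,
-- so the "" default of getD is never consulted on admitted inputs.
def aStep (d : PySem.Dict String Int) (rec : List (String × String)) : PySem.Dict String Int :=
  let impact := (PySem.Dict.mk rec).getD "impact" ""
  if impact = "high" then
    let d := d.insert "security_score_increase" (d.getD "security_score_increase" 0 + 10)
    d.insert "vulnerability_reduction" (d.getD "vulnerability_reduction" 0 + 2)
  else if impact = "medium" then
    let d := d.insert "security_score_increase" (d.getD "security_score_increase" 0 + 5)
    d.insert "vulnerability_reduction" (d.getD "vulnerability_reduction" 0 + 1)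
  else d

def calculate_expected_improvements_py (recommendations : List (List (String × String))) : List (String × Int) :=
  let improvements : PySem.Dict String Int :=
    PySem.Dict.mk [("security_score_increase", 0), ("vulnerability_reduction", 0),
                  ("compliance_improvement", 0), ("risk_reduction", 0)]
  let improvements := recommendations.foldl aStep improvements
  let improvements := improvements.insert "security_score_increase" (min (improvements.getD "security_score_increase" 0) 50)
  let improvements := improvements.insert "vulnerability_reduction" (min (improvements.getD "vulnerability_reduction" 0) 20)
  improvements.items

-- ===== PORT B =====
def calculate_expected_improvements_py_alt (recommendations : List (List (String × String))) : List (String × Int) :=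
  let impacts := recommendations.map (fun rec => (PySem.Dict.mk rec).getD "impact" "")
  let high : Int := PySem.List.count impacts "high"
  let medium : Int := PySem.List.count impacts "medium"
  [("security_score_increase", min (10 * high + 5 * medium) 50),
   ("vulnerability_reduction", min (2 * high + medium) 20),
   ("compliance_improvement", 0),
   ("risk_reduction", 0)]

-- ===== PRECONDITION & SPEC =====
-- Pre_ excludes exactly the inputs where some rec lacks the 'impact' key, on which A raises KeyError.
def Pre_calculate_expected_improvements_py (recommendations : List (List (String × String))) : Prop :=
  (recommendations.all (fun rec => rec.any (fun p => p.1 == "impact"))) = true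
instance (recommendations : List (List (String × String))) : Decidable (Pre_calculate_expected_improvements_py recommendations) := by unfold Pre_calculate_expected_improvements_py; infer_instance

def pvWitness_calculate_expected_improvements_py : (List (List (String × String))) :=
  [[("impact", "high")], [("impact", "medium")], [("impact", "low")]]

def Spec_calculate_expected_improvements_py (recommendations : List (List (String × String))) (out : List (String × Int)) : Prop := out = calculate_expected_improvements_py_alt recommendations
instance (recommendations : List (List (String × String))) (out : List (String × Int)) : Decidable (Spec_calculate_expected_improvements_py recommendations out) := by unfold Spec_calculate_expected_improvements_py; infer_instance

-- ===== CLAIM (what is proved, stated in full; the proofs are below) =====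
def Claim_equal_calculate_expected_improvements_py : Prop := ∀ (recommendations : List (List (String × String))), Dom_calculate_expected_improvements_py recommendations → Pre_calculate_expected_improvements_py recommendations → Spec_calculate_expected_improvements_py recommendations (calculate_expected_improvements_py recommendations)

-- ===== LEMMAS AND PROOFS =====

-- The loop keeps the 4-entry dict shape; its first two values accumulate 10/5 and 2/1 per
-- high/medium impact, counted over the mapped impact list.
theorem aLoop_closed (recs : List (List (String × String))) (s v : Int) :
    recs.foldl aStep (PySem.Dict.mk
      [("security_score_increase", s), ("vulnerability_reduction", v),
       ("compliance_improvement", 0), ("risk_reduction", 0)]) =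
    PySem.Dict.mk
      [("security_score_increase",
          s + 10 * ((recs.map (fun rec => (PySem.Dict.mk rec).getD "impact" "")).count "high" : Int)
            + 5 * ((recs.map (fun rec => (PySem.Dict.mk rec).getD "impact" "")).count "medium" : Int)),
       ("vulnerability_reduction",
          v + 2 * ((recs.map (fun rec => (PySem.Dict.mk rec).getD "impact" "")).count "high" : Int)
            + ((recs.map (fun rec => (PySem.Dict.mk rec).getD "impact" "")).count "medium" : Int)),
       ("compliance_improvement", 0), ("risk_reduction", 0)] := by
  induction recs generalizing s v with
  | nil => simp
  | cons rec rest ih =>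
      by_cases hh : (PySem.Dict.mk rec).getD "impact" "" = "high"
      · simp only [List.foldl_cons, aStep, hh]
        simp [PySem.Dict.insert, PySem.Dict.getD, PySem.Dict.get?]
        rw [ih]
        simp only [PySem.Dict.getD, PySem.Dict.get?] at hh
        simp [PySem.Dict.getD, PySem.Dict.get?, hh]
        constructor <;> ring
      · by_cases hm : (PySem.Dict.mk rec).getD "impact" "" = "medium"
        · simp only [List.foldl_cons, aStep, hm, reduceIte]
          simp [PySem.Dict.insert, PySem.Dict.getD, PySem.Dict.get?]
          rw [ih]
          simp only [PySem.Dict.getD, PySem.Dict.get?] at hm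
          simp [PySem.Dict.getD, PySem.Dict.get?, hm]
          constructor <;> ring
        · simp only [List.foldl_cons, aStep, hh, hm, reduceIte]
          rw [ih]
          simp only [PySem.Dict.getD, PySem.Dict.get?] at hh hm
          simp [PySem.Dict.getD, PySem.Dict.get?, hh, hm]

-- ===== VERDICT (by name: the statement is the Claim_ definition above) =====
theorem calculate_expected_improvements_py_spec : Claim_equal_calculate_expected_improvements_py := by
  intro recs _ _
  unfold Spec_calculate_expected_improvements_py
  unfold calculate_expected_improvements_py calculate_expected_improvements_py_alt
  dsimp only
  rw [aLoop_closed recs 0 0]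
  simp [PySem.Dict.insert, PySem.Dict.getD, PySem.Dict.get?, PySem.List.count]
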